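-- pv_equiv track=rewrite | github.com/ykcchong/Familias-py | src/familias/tui/compute.py | is_mismatch_two_parents
-- ===== SOURCE A (Python) =====
-- from typing import Dict, Iterable, List, Optional, Tuple
--
-- def is_mismatch_two_parents(
--     known: Optional[Tuple[str, str]],
--     alleged: Optional[Tuple[str, str]],
--     child: Optional[Tuple[str, str]],
-- ) -> bool:
--     """True iff no allele assignment makes the trio Mendelian-consistent."""
--     if known is None or alleged is None or child is None:
--         return False
--     ca, cb = child
--     for k_alle in known:
--         for a_alle in alleged:
--             if {k_alle, a_alle} == {ca, cb} or (
--                 k_alle == ca and a_alle == cb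
--             ) or (k_alle == cb and a_alle == ca):
--                 return False
--     return True
-- ===== SOURCE B (Python) =====
-- from typing import Optional, Tuple
--
-- def is_mismatch_two_parents(
--     known: Optional[Tuple[str, str]],
--     alleged: Optional[Tuple[str, str]],
--     child: Optional[Tuple[str, str]],
-- ) -> bool:
--     """True iff no allele assignment makes the trio Mendelian-consistent.
--
--     Solved as a tiny bipartite matching: try to assign each child allele,
--     in order, to a distinct parent that carries it, backtracking on failure.
--     """
--     if known is None or alleged is None or child is None:
--         return False
--     parents = [known, alleged]
--
--     def assign(remaining, used):
--         if not remaining: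
--             return True
--         c = remaining[0]
--         for j, p in enumerate(parents):
--             if j in used:
--                 continue
--             if c in p and assign(remaining[1:], used | {j}):
--                 return True
--         return False
--
--     return not assign(list(child), frozenset())
-- ===== Notes on version B (the rewrite author's own statement) =====
-- stated objective: alternative
-- what changed: Replaces A's brute-force scan over the 2x2 grid of parent allele pairs (set-equality plus ordered checks) by recursive backtracking bipartite matching: each child allele is assigned in turn to a distinct unused parent carrying it; correct because a trio is consistent exactly when such a matching exists.
import Mathlib
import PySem

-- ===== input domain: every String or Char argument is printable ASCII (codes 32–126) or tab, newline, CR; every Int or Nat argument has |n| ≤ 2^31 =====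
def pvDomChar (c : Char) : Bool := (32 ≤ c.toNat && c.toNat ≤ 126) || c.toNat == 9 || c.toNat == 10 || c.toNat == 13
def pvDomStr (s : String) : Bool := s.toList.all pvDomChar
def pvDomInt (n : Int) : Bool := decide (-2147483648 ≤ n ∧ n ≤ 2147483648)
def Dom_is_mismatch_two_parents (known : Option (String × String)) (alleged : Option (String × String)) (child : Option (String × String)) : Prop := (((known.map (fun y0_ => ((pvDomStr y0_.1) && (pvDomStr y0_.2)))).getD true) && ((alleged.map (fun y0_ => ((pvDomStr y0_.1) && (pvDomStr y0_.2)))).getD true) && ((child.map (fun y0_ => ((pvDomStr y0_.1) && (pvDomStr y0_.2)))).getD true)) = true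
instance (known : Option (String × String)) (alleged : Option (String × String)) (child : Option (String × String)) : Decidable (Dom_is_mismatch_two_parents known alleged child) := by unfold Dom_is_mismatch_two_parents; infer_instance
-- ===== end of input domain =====

-- B replaces A's nested scan over parent allele pairs by recursive backtracking bipartite
-- matching: assign each child allele to a distinct parent carrying it (alternative algorithm).


-- ===== PORT A =====
-- {k_alle, a_alle} == {ca, cb}: Python two-element set equality, written out as mutual membership
def pvSetEq2 (k a ca cb : String) : Bool :=
  (k == ca || k == cb) && (a == ca || a == cb) && (k == ca || a == ca) && (k == cb || a == cb)

def is_mismatch_two_parents (known : Option (String × String)) (alleged : Option (String × String)) (child : Option (String × String)) : Bool :=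
  match known, alleged, child with
  | none, _, _ => false
  | _, none, _ => false
  | _, _, none => false
  | some (k1, k2), some (a1, a2), some (ca, cb) =>
    -- the nested for-loops with an early `return False` on a hit
    !([k1, k2].any (fun k_alle =>
        [a1, a2].any (fun a_alle =>
          pvSetEq2 k_alle a_alle ca cb ||
            (k_alle == ca && a_alle == cb) || (k_alle == cb && a_alle == ca))))

-- ===== PORT B =====
-- inner `assign(remaining, used)`: backtracking assignment of child alleles to distinct parents
def pvAssign (parents : List (String × String)) : List String → List Nat → Bool
  | [], _ => true
  | c :: rest, used =>
      (PySem.List.enumerate parents).any (fun jp =>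
        !(used.contains jp.1.toNat) &&
        ((jp.2.1 == c || jp.2.2 == c) && pvAssign parents rest (jp.1.toNat :: used)))

def is_mismatch_two_parents_alt (known : Option (String × String)) (alleged : Option (String × String)) (child : Option (String × String)) : Bool :=
  match known, alleged, child with
  | some kn, some al, some (ca, cb) =>
    !(pvAssign [kn, al] [ca, cb] [])
  | _, _, _ => false

-- ===== PRECONDITION & SPEC =====
def Spec_is_mismatch_two_parents (known : Option (String × String)) (alleged : Option (String × String)) (child : Option (String × String)) (out : Bool) : Prop := out = is_mismatch_two_parents_alt known alleged child
instance (known : Option (String × String)) (alleged : Option (String × String)) (child : Option (String × String)) (out : Bool) : Decidable (Spec_is_mismatch_two_parents known alleged child out) := by unfold Spec_is_mismatch_two_parents; infer_instance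

-- ===== CLAIM (what is proved, stated in full; the proofs are below) =====
def Claim_equal_is_mismatch_two_parents : Prop := ∀ (known : Option (String × String)) (alleged : Option (String × String)) (child : Option (String × String)), Dom_is_mismatch_two_parents known alleged child → Spec_is_mismatch_two_parents known alleged child (is_mismatch_two_parents known alleged child)

-- ===== LEMMAS AND PROOFS =====
theorem pvBeqDec (x y : String) : (x == y) = decide (x = y) := rfl

-- ===== VERDICT =====
theorem is_mismatch_two_parents_spec : Claim_equal_is_mismatch_two_parents := by
  intro known alleged child _
  unfold Spec_is_mismatch_two_parents
  rcases known with _ | ⟨k1, k2⟩ <;> rcases alleged with _ | ⟨a1, a2⟩ <;>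
    rcases child with _ | ⟨ca, cb⟩ <;>
    simp only [is_mismatch_two_parents, is_mismatch_two_parents_alt, pvSetEq2, pvAssign,
      PySem.List.enumerate, List.any_cons, List.any_nil, List.contains_cons, List.contains_nil]
  by_cases h1 : k1 = ca <;> by_cases h2 : k1 = cb <;> by_cases h3 : k2 = ca <;>
    by_cases h4 : k2 = cb <;> by_cases h5 : a1 = ca <;> by_cases h6 : a1 = cb <;>
    by_cases h7 : a2 = ca <;> by_cases h8 : a2 = cb <;> by_cases h9 : ca = cb <;>
    simp_all [pvBeqDec, eq_comm]
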